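-- pv_equiv track=rewrite | github.com/jamedeus/micropython-smarthome | CLI/normalize_ir_code_timings.py | normalize_timings
-- ===== SOURCE A (Python) =====
-- def normalize_timings(timings):
--     '''Takes array of raw IR pulse/space integers (microseconds) recorded with
--     lirc, returns array with timings normalized to NEC spec.
--
--     Normalizing timings improves memory efficiency by reducing the number of
--     ints that need to be allocated (recordings have random variance of a few
--     microseconds that causes most ints to be unique, after normalizing there
--     are only 4 ints).
--
--     To record raw timings run `mode2 -d /dev/lirc0`, point remote at receiver,
--     and press remote button. If you get hex codes instead of timings set
--     `driver=default` in `/etc/lirc/lirc_options.conf`.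
--     '''
--     normalized = []
--     for t in timings:
--         # Header pulse
--         if 8500 <= t <= 9500:
--             normalized.append(9000)
--         # Header space
--         elif 4000 <= t <= 5000:
--             normalized.append(4500)
--         # Logical 1 space
--         elif 1500 <= t <= 1800:
--             normalized.append(1690)
--         # Logical 1 pulse, logical 0 space or pulse
--         elif 500 <= t <= 700:
--             normalized.append(560)
--         # Add unexpected values unchanged
--         else:
--             normalized.append(t)
--     return normalized
-- ===== SOURCE B (Python) =====
-- # B: binary search (hand-rolled bisect_right) over the sorted interval edges;
-- # an odd insertion index means t falls inside a normalization interval.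
-- EDGES = [500, 701, 1500, 1801, 4000, 5001, 8500, 9501]
-- VALUES = [560, 1690, 4500, 9000]
--
--
-- def _bucket(t):
--     """Number of edges <= t (bisect_right over EDGES)."""
--     lo, hi = 0, len(EDGES)
--     while lo < hi:
--         mid = (lo + hi) // 2
--         if EDGES[mid] <= t:
--             lo = mid + 1
--         else:
--             hi = mid
--     return lo
--
--
-- def normalize_timings(timings):
--     out = []
--     for t in timings:
--         i = _bucket(t)
--         out.append(VALUES[i // 2] if i % 2 else t)
--     return out
-- ===== Notes on version B (the rewrite author's own statement) =====
-- stated objective: alternative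
-- what changed: Replaces the if/elif range ladder with a hand-rolled binary search (bisect_right) over the sorted list of interval edges: an odd insertion index means t lies inside an interval and its index/2 selects the NEC value; even means pass t through unchanged.
import Mathlib
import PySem

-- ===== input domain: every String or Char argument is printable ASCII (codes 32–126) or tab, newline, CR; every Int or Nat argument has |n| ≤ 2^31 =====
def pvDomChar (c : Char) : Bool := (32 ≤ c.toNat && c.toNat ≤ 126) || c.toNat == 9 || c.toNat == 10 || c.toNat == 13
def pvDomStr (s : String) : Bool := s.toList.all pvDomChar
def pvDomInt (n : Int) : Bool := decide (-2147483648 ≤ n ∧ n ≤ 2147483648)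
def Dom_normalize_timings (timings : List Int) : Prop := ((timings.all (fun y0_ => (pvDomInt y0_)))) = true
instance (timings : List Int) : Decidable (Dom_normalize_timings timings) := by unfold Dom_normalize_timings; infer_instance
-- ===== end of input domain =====

-- B replaces A's if/elif range ladder by a hand-rolled binary search over the sorted interval edges (alternative decomposition).

-- ===== PORT A =====
-- A: fold over timings appending the normalized value chosen by the if/elif ladder.
def normalize_timings (timings : List Int) : List Int :=
  timings.foldl (fun normalized t =>
    if 8500 ≤ t ∧ t ≤ 9500 then normalized ++ [9000]
    else if 4000 ≤ t ∧ t ≤ 5000 then normalized ++ [4500]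
    else if 1500 ≤ t ∧ t ≤ 1800 then normalized ++ [1690]
    else if 500 ≤ t ∧ t ≤ 700 then normalized ++ [560]
    else normalized ++ [t]) []

-- ===== PORT B =====
-- B: hand-rolled bisect_right over the sorted edges; an odd insertion index means t is inside an interval.
def pvEdges : List Int := [500, 701, 1500, 1801, 4000, 5001, 8500, 9501]
def pvValues : List Int := [560, 1690, 4500, 9000]

-- the `while lo < hi` binary search; the Nat fuel (= initial hi - lo) is only a totality guard,
-- each iteration halves the interval so it never runs out
def pvBucketGo (t : Int) : Nat → Nat → Nat → Nat
  | 0, lo, _ => lo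
  | fuel + 1, lo, hi =>
    if lo < hi then
      let mid := (lo + hi) / 2
      if pvEdges.getD mid 0 ≤ t then pvBucketGo t fuel (mid + 1) hi
      else pvBucketGo t fuel lo mid
    else lo

def pvBucket (t : Int) (lo hi : Nat) : Nat := pvBucketGo t (hi - lo) lo hi

def normalize_timings_alt (timings : List Int) : List Int :=
  timings.foldl (fun out t =>
    let i := pvBucket t 0 8
    out ++ [if i % 2 ≠ 0 then pvValues.getD (i / 2) 0 else t]) []

-- ===== PRECONDITION & SPEC =====
def Spec_normalize_timings (timings : List Int) (out : List Int) : Prop := out = normalize_timings_alt timings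
instance (timings : List Int) (out : List Int) : Decidable (Spec_normalize_timings timings out) := by unfold Spec_normalize_timings; infer_instance

-- ===== CLAIM (what is proved, stated in full; the proofs are below) =====
def Claim_equal_normalize_timings : Prop := ∀ (timings : List Int), Dom_normalize_timings timings → Spec_normalize_timings timings (normalize_timings timings)

-- ===== LEMMAS AND PROOFS =====

-- the binary search lands in the bucket determined by the edges
lemma pv_bucket_eq (t : Int) : pvBucket t 0 8 =
    (if 9501 ≤ t then 8 else if 8500 ≤ t then 7 else if 5001 ≤ t then 6
     else if 4000 ≤ t then 5 else if 1801 ≤ t then 4 else if 1500 ≤ t then 3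
     else if 701 ≤ t then 2 else if 500 ≤ t then 1 else 0) := by
  unfold pvBucket
  simp only [pvBucketGo, pvEdges]
  norm_num
  split_ifs <;> omega

-- pointwise: the bisect result maps to the same value as A's ladder
lemma pv_point (t : Int) :
    (if pvBucket t 0 8 % 2 ≠ 0 then pvValues.getD (pvBucket t 0 8 / 2) 0 else t)
    = (if 8500 ≤ t ∧ t ≤ 9500 then (9000 : Int)
       else if 4000 ≤ t ∧ t ≤ 5000 then 4500
       else if 1500 ≤ t ∧ t ≤ 1800 then 1690
       else if 500 ≤ t ∧ t ≤ 700 then 560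
       else t) := by
  rw [pv_bucket_eq]
  split_ifs <;> norm_num [pvValues] <;> omega

lemma pv_foldl (ts : List Int) (acc : List Int) :
    ts.foldl (fun normalized t =>
      if 8500 ≤ t ∧ t ≤ 9500 then normalized ++ [9000]
      else if 4000 ≤ t ∧ t ≤ 5000 then normalized ++ [4500]
      else if 1500 ≤ t ∧ t ≤ 1800 then normalized ++ [1690]
      else if 500 ≤ t ∧ t ≤ 700 then normalized ++ [560]
      else normalized ++ [t]) acc
    = ts.foldl (fun out t =>
        let i := pvBucket t 0 8
        out ++ [if i % 2 ≠ 0 then pvValues.getD (i / 2) 0 else t]) acc := by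
  induction ts generalizing acc with
  | nil => rfl
  | cons t ts ih =>
    simp only [List.foldl_cons]
    rw [show (if 8500 ≤ t ∧ t ≤ 9500 then acc ++ [(9000 : Int)]
          else if 4000 ≤ t ∧ t ≤ 5000 then acc ++ [4500]
          else if 1500 ≤ t ∧ t ≤ 1800 then acc ++ [1690]
          else if 500 ≤ t ∧ t ≤ 700 then acc ++ [560]
          else acc ++ [t])
        = acc ++ [if pvBucket t 0 8 % 2 ≠ 0 then pvValues.getD (pvBucket t 0 8 / 2) 0 else t] from by
      rw [pv_point t]; split_ifs <;> rfl]
    exact ih _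

-- ===== VERDICT (by name: the statement is the Claim_ definition above) =====
theorem normalize_timings_spec : Claim_equal_normalize_timings := by
  intro ts _
  unfold Spec_normalize_timings normalize_timings normalize_timings_alt
  exact pv_foldl ts []
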